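-- pv_equiv track=rewrite | github.com/GyanPrakashkushwaha/DSA | graph/rotten-orange.py | orangeRotting
-- ===== SOURCE A (Python) =====
-- from collections import deque
--
-- def orangeRotting(grid):
--     n, m = len(grid), len(grid[0])
--     visited = [[0]*m for _ in range(n)]
--
--     def bfs(grid, start):
--         queue = deque([start])
--         visited[start[0]][start[1]] = 1
--         directions = [(-1, 0), (1, 0), (0, -1), (0, 1)]
--
--         # Variable for checking....
--         while queue:
--             r, c = queue.popleft()
--             # return logic.....
--             for dr, dc in directions:
--                 nr, nc = dr+r, dc+c
--                 if 0 <= nr < n and 0 <= nc < m and not visited[nr][nc] and grid[nr][nc]: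
--                     visited[nr][nc] = 1
--                     queue.append((nr, nc))
--
--     counter = 0
--     for i in range(n):
--         for j in range(m):
--             if not visited[i][j] and grid[i][j]:
--                 counter += 1
--                 bfs(grid, (i,j))
--
--     return 4 if counter == 1 else -1
-- ===== SOURCE B (Python) =====
-- def orangeRotting(grid):
--     n, m = len(grid), len(grid[0])
--     todo = {(i, j) for i in range(n) for j in range(m) if grid[i][j]}
--     comps = 0
--     while todo:
--         comps += 1
--         frontier = {min(todo)}
--         todo -= frontier
--         while frontier:
--             frontier = {(r + dr, c + dc) for r, c in frontier
--                         for dr, dc in ((-1, 0), (1, 0), (0, -1), (0, 1))} & todo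
--             todo -= frontier
--     return 4 if comps == 1 else -1
-- ===== Notes on version B (the rewrite author's own statement) =====
-- stated objective: simpler
-- what changed: A's per-cell BFS with a FIFO queue and a mutable visited matrix is replaced by whole-frontier set saturation: B builds one set of all truthy cells, repeatedly extracts the minimal remaining cell and dissolves its whole component by expanding a frontier set with set intersection/difference, counting components; no queue, no visited matrix.
import Mathlib
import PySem

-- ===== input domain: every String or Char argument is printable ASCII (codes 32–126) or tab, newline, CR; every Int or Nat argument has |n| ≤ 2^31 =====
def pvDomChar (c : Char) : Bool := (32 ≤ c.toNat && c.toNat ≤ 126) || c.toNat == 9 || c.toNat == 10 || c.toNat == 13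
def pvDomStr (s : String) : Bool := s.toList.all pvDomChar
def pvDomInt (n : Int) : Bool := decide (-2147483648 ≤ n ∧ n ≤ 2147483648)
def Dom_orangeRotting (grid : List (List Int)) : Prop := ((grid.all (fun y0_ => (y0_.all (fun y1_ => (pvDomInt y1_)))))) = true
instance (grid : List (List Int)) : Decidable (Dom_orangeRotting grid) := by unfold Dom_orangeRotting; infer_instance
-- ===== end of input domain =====

-- B replaces A's per-cell BFS (FIFO queue + mutable visited matrix) by whole-frontier
-- set saturation over a single set of the truthy cells; objective: simpler (not faster).

-- ===== PORT A =====
-- grid[i][j] / visited[i][j]: every access is guarded in range by A's code (and by Pre_),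
-- so the `.getD` defaults are never the value Python sees.
def pvCell (g : List (List Int)) (i j : Int) : Int :=
  (PySem.List.pyGet? ((PySem.List.pyGet? g i).getD []) j).getD 0

def pvDirs : List (Int × Int) := [(-1, 0), (1, 0), (0, -1), (0, 1)]

-- visited[i][j] = 1 (indices nonnegative and in range at every use)
def pvVSet (v : List (List Int)) (i j : Int) : List (List Int) :=
  v.set i.toNat ((v.getD i.toNat []).set j.toNat 1)

-- the body of A's `for dr, dc in directions` loop
def pvAStep (g : List (List Int)) (n m r c : Int)
    (s : List (List Int) × List (Int × Int)) : List (List Int) × List (Int × Int) :=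
  pvDirs.foldl (fun s d =>
    if 0 ≤ d.1 + r ∧ d.1 + r < n ∧ 0 ≤ d.2 + c ∧ d.2 + c < m ∧
        pvCell s.1 (d.1 + r) (d.2 + c) = 0 ∧ pvCell g (d.1 + r) (d.2 + c) ≠ 0
    then (pvVSet s.1 (d.1 + r) (d.2 + c), s.2 ++ [(d.1 + r, d.2 + c)])
    else s) s

-- A's `while queue` loop; fuel is only a totality guard (2·#zeros(visited)+#queue shrinks)
def pvABfs (g : List (List Int)) (n m : Int) :
    Nat → List (List Int) → List (Int × Int) → List (List Int)
  | 0, v, _ => v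
  | _ + 1, v, [] => v
  | fuel + 1, v, (r, c) :: rest =>
    let s := pvAStep g n m r c (v, rest)
    pvABfs g n m fuel s.1 s.2

def orangeRotting (grid : List (List Int)) : Int :=
  match PySem.List.pyGet? grid 0 with
  | none => -1  -- grid[0] raises IndexError in Python; excluded by Pre_
  | some row0 =>
    let n : Int := grid.length
    let m : Int := row0.length
    let v0 : List (List Int) := List.replicate n.toNat (List.replicate m.toNat 0)
    let fin := (PySem.List.pyRange 0 n).foldl (fun s i =>
      (PySem.List.pyRange 0 m).foldl (fun (s : List (List Int) × Int) j =>
        if pvCell s.1 i j = 0 ∧ pvCell grid i j ≠ 0 then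
          (pvABfs grid n m (2 * n.toNat * m.toNat + 1) (pvVSet s.1 i j) [(i, j)], s.2 + 1)
        else s) s) (v0, 0)
    if fin.2 = 1 then 4 else -1

-- ===== PORT B =====
-- {(r+dr, c+dc) for dr, dc in ((-1,0),(1,0),(0,-1),(0,1))}
def pvNbrs (p : Int × Int) : List (Int × Int) :=
  pvDirs.map (fun d => (p.1 + d.1, p.2 + d.2))

-- B's inner `while frontier` loop; fuel is only a totality guard (todo shrinks)
def pvBSat : Nat → PySem.Set (Int × Int) → PySem.Set (Int × Int) → PySem.Set (Int × Int)
  | 0, _, todo => todo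
  | fuel + 1, frontier, todo =>
    if frontier.isEmpty then todo
    else
      let fr := PySem.Set.inter (PySem.Set.ofList (frontier.flatMap pvNbrs)) todo
      pvBSat fuel fr (PySem.Set.diff todo fr)

-- B's outer `while todo` loop; fuel is only a totality guard (todo shrinks)
def pvBLoop : Nat → PySem.Set (Int × Int) → Int → Int
  | 0, _, comps => comps
  | fuel + 1, todo, comps =>
    if todo.isEmpty then comps
    else
      -- min(todo): tuple min = lexicographic; todo is nonempty so the default is dead
      let s := (PySem.List.min2? todo Prod.fst Prod.snd).getD (0, 0)
      let todo1 := PySem.Set.diff todo [s]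
      pvBLoop fuel (pvBSat (todo1.length + 1) (PySem.Set.ofList [s]) todo1) (comps + 1)

def orangeRotting_alt (grid : List (List Int)) : Int :=
  match PySem.List.pyGet? grid 0 with
  | none => -1  -- grid[0] raises IndexError in Python; excluded by Pre_
  | some row0 =>
    let n : Int := grid.length
    let m : Int := row0.length
    let todo : PySem.Set (Int × Int) :=
      PySem.Set.ofList ((PySem.List.pyRange 0 n).flatMap (fun i =>
        ((PySem.List.pyRange 0 m).filter (fun j => pvCell grid i j != 0)).map (fun j => (i, j))))
    let comps := pvBLoop (todo.length + 1) todo 0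
    if comps = 1 then 4 else -1

-- ===== PRECONDITION & SPEC =====
-- Pre_ excludes exactly the inputs where Python A raises IndexError: the empty grid
-- (len(grid[0])) and grids with a row shorter than the first row (grid[i][j], j < m).
def Pre_orangeRotting (grid : List (List Int)) : Prop :=
  grid ≠ [] ∧ ∀ row ∈ grid, grid.headI.length ≤ row.length
instance (grid : List (List Int)) : Decidable (Pre_orangeRotting grid) := by
  unfold Pre_orangeRotting; infer_instance

def pvWitness_orangeRotting : List (List Int) := [[1, 0], [0, 2]]

def Spec_orangeRotting (grid : List (List Int)) (out : Int) : Prop := out = orangeRotting_alt grid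
instance (grid : List (List Int)) (out : Int) : Decidable (Spec_orangeRotting grid out) := by
  unfold Spec_orangeRotting; infer_instance

-- ===== CLAIM (what is proved, stated in full; the proofs are below) =====
def Claim_equal_orangeRotting : Prop := ∀ (grid : List (List Int)), Dom_orangeRotting grid → Pre_orangeRotting grid → Spec_orangeRotting grid (orangeRotting grid)

-- ===== LEMMAS AND PROOFS =====

def pvShape (n m : Nat) (v : List (List Int)) : Prop :=
  v.length = n ∧ ∀ r ∈ v, r.length = m

def pvZeros (v : List (List Int)) : Nat := (v.map (fun r => r.count 0)).sum

def pvVP (v : List (List Int)) (p : Int × Int) : Prop :=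
  0 ≤ p.1 ∧ 0 ≤ p.2 ∧ pvCell v p.1 p.2 ≠ 0

def pvInb (n m : Int) (p : Int × Int) : Prop :=
  0 ≤ p.1 ∧ p.1 < n ∧ 0 ≤ p.2 ∧ p.2 < m

def pvTr (g : List (List Int)) (n m : Int) (p : Int × Int) : Prop :=
  pvInb n m p ∧ pvCell g p.1 p.2 ≠ 0

def pvAdj (p q : Int × Int) : Prop := ∃ d ∈ pvDirs, q = (d.1 + p.1, d.2 + p.2)

def pvStep (g : List (List Int)) (n m : Int) (V : Int × Int → Prop) (p q : Int × Int) : Prop :=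
  pvAdj p q ∧ pvTr g n m q ∧ ¬ V q

def pvAdd (g : List (List Int)) (n m : Int) (V : Int × Int → Prop) (s p : Int × Int) : Prop :=
  Relation.ReflTransGen (pvStep g n m V) s p

lemma pvCell_eq (v : List (List Int)) (i j : Int) (hi : 0 ≤ i) (hj : 0 ≤ j) :
    pvCell v i j = (v.getD i.toNat []).getD j.toNat 0 := by
  unfold pvCell
  rw [show i = ((i.toNat : Nat) : Int) from (Int.toNat_of_nonneg hi).symm,
      show j = ((j.toNat : Nat) : Int) from (Int.toNat_of_nonneg hj).symm,
      PySem.List.pyGet?_natCast, PySem.List.pyGet?_natCast,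
      List.getD_eq_getElem?_getD, List.getD_eq_getElem?_getD]
  simp [max_eq_left hi, max_eq_left hj]

lemma pvVP_iff (v : List (List Int)) (p : Int × Int) (h1 : 0 ≤ p.1) (h2 : 0 ≤ p.2) :
    pvVP v p ↔ (v.getD p.1.toNat []).getD p.2.toNat 0 ≠ 0 := by
  unfold pvVP
  rw [pvCell_eq v _ _ h1 h2]
  simp [h1, h2]

lemma pvCellN_vset (v : List (List Int)) (i j : Int) (a b : Nat) :
    ((pvVSet v i j).getD a []).getD b 0 =
      if a = i.toNat ∧ b = j.toNat ∧ i.toNat < v.length ∧ j.toNat < (v.getD i.toNat []).length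
      then 1 else (v.getD a []).getD b 0 := by
  unfold pvVSet
  simp only [List.getD_eq_getElem?_getD]
  rw [List.getElem?_set]
  by_cases hia : i.toNat = a
  · simp only [hia, if_true]
    by_cases hlen : a < v.length
    · simp only [hlen, if_true, Option.getD_some]
      rw [List.getElem?_set]
      by_cases hjb : j.toNat = b
      · subst hjb; subst hia
        by_cases hjl : j.toNat < (v[i.toNat]?.getD []).length
        · simp [hjl]
        · simp [hjl]
      · subst hia
        rw [if_neg hjb, if_neg (by tauto)]
    · subst hia
      rw [if_neg (by tauto)]
      simp [List.getElem?_eq_none (le_of_not_gt hlen)]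
  · rw [if_neg hia, if_neg (by tauto)]

lemma pvVSet_shape {n m : Nat} {v : List (List Int)} (hsh : pvShape n m v)
    (i j : Int) : pvShape n m (pvVSet v i j) := by
  obtain ⟨hl, hr⟩ := hsh
  by_cases hin : i.toNat < v.length
  · refine ⟨by simp [pvVSet, hl], ?_⟩
    intro r hrmem
    rcases List.mem_or_eq_of_mem_set hrmem with h | h
    · exact hr r h
    · subst h
      rw [List.length_set, List.getD_eq_getElem?_getD, List.getElem?_eq_getElem hin]
      exact hr _ (List.getElem_mem hin)
  · rw [pvVSet, List.set_eq_of_length_le (le_of_not_gt hin)]; exact ⟨hl, hr⟩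

lemma pvVP_vset {n m : Nat} {v : List (List Int)} (hsh : pvShape n m v)
    {i j : Int} (hi : 0 ≤ i) (hin : i.toNat < n) (hj : 0 ≤ j) (hjm : j.toNat < m)
    (p : Int × Int) :
    pvVP (pvVSet v i j) p ↔ (pvVP v p ∨ p = (i, j)) := by
  obtain ⟨hl, hr⟩ := hsh
  have hvin : i.toNat < v.length := by omega
  have hrowlen : (v.getD i.toNat []).length = m := by
    rw [List.getD_eq_getElem?_getD, List.getElem?_eq_getElem hvin]
    exact hr _ (List.getElem_mem hvin)
  by_cases h1 : 0 ≤ p.1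
  · by_cases h2 : 0 ≤ p.2
    · rw [pvVP_iff _ _ h1 h2, pvVP_iff _ _ h1 h2, pvCellN_vset]
      have hpij : p = (i, j) ↔ (p.1.toNat = i.toNat ∧ p.2.toNat = j.toNat) := by
        constructor
        · rintro rfl; simp
        · rintro ⟨ha, hb⟩
          have : p.1 = i := by omega
          have : p.2 = j := by omega
          exact Prod.ext ‹p.1 = i› ‹p.2 = j›
      by_cases hc : p.1.toNat = i.toNat ∧ p.2.toNat = j.toNat
      · rw [if_pos ⟨hc.1, hc.2, hvin, by omega⟩]
        simp [hpij, hc]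
      · rw [if_neg (by tauto)]
        constructor
        · intro h; exact Or.inl h
        · rintro (h | h)
          · exact h
          · exact absurd (hpij.mp h) hc
    · constructor
      · rintro ⟨_, hb, _⟩; omega
      · rintro (⟨_, hb, _⟩ | rfl)
        · omega
        · omega
  · constructor
    · rintro ⟨ha, _, _⟩; omega
    · rintro (⟨ha, _, _⟩ | rfl)
      · omega
      · omega

lemma pvZeros_vset {n m : Nat} {v : List (List Int)} (hsh : pvShape n m v)
    {i j : Int} (hi : 0 ≤ i) (hin : i.toNat < n) (hj : 0 ≤ j) (hjm : j.toNat < m)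
    (h0 : pvCell v i j = 0) : pvZeros (pvVSet v i j) + 1 = pvZeros v := by
  obtain ⟨hl, hr⟩ := hsh
  have hvin : i.toNat < v.length := by omega
  have hrow : v.getD i.toNat [] = v[i.toNat] := by
    rw [List.getD_eq_getElem?_getD, List.getElem?_eq_getElem hvin]; rfl
  have hrowlen : v[i.toNat].length = m := hr _ (List.getElem_mem hvin)
  have hjl : j.toNat < v[i.toNat].length := by omega
  have hcell : v[i.toNat][j.toNat] = 0 := by
    rw [pvCell_eq _ _ _ hi hj, hrow, List.getD_eq_getElem?_getD,
        List.getElem?_eq_getElem hjl] at h0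
    exact h0
  -- count of the modified row drops by one
  have hcount : (v[i.toNat].set j.toNat 1).count 0 + 1 = v[i.toNat].count 0 := by
    rw [List.count_set hjl]
    have hpos : 0 < v[i.toNat].count 0 := by
      rw [List.count_pos_iff]
      exact hcell ▸ List.getElem_mem hjl
    simp [hcell]
    omega
  unfold pvZeros pvVSet
  rw [hrow, List.map_set]
  rw [List.sum_set]
  have hmaplen : i.toNat < (v.map (fun r => r.count 0)).length := by simpa using hvin
  have hsplit : (v.map (fun r => r.count 0)).sum =
      ((v.map (fun r => r.count 0)).take i.toNat).sum + v[i.toNat].count 0 +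
        ((v.map (fun r => r.count 0)).drop (i.toNat + 1)).sum := by
    conv_lhs => rw [← List.take_append_drop i.toNat (v.map (fun r => r.count 0))]
    rw [List.sum_append, List.drop_eq_getElem_cons hmaplen]
    simp [List.getElem_map]
    ring
  rw [hsplit, if_pos hmaplen]
  omega

lemma pvZeros_le {n m : Nat} {v : List (List Int)} (hsh : pvShape n m v) :
    pvZeros v ≤ n * m := by
  obtain ⟨hl, hr⟩ := hsh
  unfold pvZeros
  calc (v.map (fun r => r.count 0)).sum ≤ (v.map (fun _ => m)).sum := by
        apply List.sum_le_sum
        intro r hrm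
        exact (hr r hrm) ▸ List.count_le_length
       _ = v.length * m := by
        rw [List.map_const']
        simp [List.sum_replicate]
       _ = n * m := by rw [hl]

lemma pvVP_init (n m : Nat) (p : Int × Int) :
    ¬ pvVP (List.replicate n (List.replicate m (0 : Int))) p := by
  rintro ⟨h1, h2, h3⟩
  rw [pvCell_eq _ _ _ h1 h2] at h3
  apply h3
  simp only [List.getD_eq_getElem?_getD]
  rw [List.getElem?_replicate]
  by_cases h : p.1.toNat < n
  · simp [h, List.getElem?_replicate]
    split <;> rfl
  · simp [h]

lemma pvShape_init (n m : Nat) :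
    pvShape n m (List.replicate n (List.replicate m (0 : Int))) := by
  constructor
  · simp
  · intro r hrm
    rw [List.eq_of_mem_replicate hrm]
    simp

lemma pvAdd_tr {g : List (List Int)} {n m : Int} {V : Int × Int → Prop} {s p : Int × Int}
    (hs : pvTr g n m s) (h : pvAdd g n m V s p) : pvTr g n m p := by
  induction h with
  | refl => exact hs
  | tail _ hstep _ => exact hstep.2.1

lemma pvAdd_notV {g : List (List Int)} {n m : Int} {V : Int × Int → Prop} {s p : Int × Int}
    (h : pvAdd g n m V s p) (hne : p ≠ s) : ¬ V p := by
  rcases Relation.ReflTransGen.cases_tail h with h' | ⟨c, _, hstep⟩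
  · exact absurd h' hne
  · exact hstep.2.2

lemma pvMem_nbrs (x p : Int × Int) : p ∈ pvNbrs x ↔ pvAdj x p := by
  unfold pvNbrs pvAdj
  simp only [List.mem_map]
  constructor
  · rintro ⟨d, hd, rfl⟩
    exact ⟨d, hd, by ext <;> simp <;> ring⟩
  · rintro ⟨d, hd, rfl⟩
    exact ⟨d, hd, by ext <;> simp <;> ring⟩

lemma pvAStepGen (g : List (List Int)) {n m : Int} (hn : 0 ≤ n) (hm : 0 ≤ m)
    (r c : Int) (D : List (Int × Int)) :
    ∀ (v : List (List Int)) (q : List (Int × Int)), pvShape n.toNat m.toNat v →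
    ∃ v' new,
      D.foldl (fun s d =>
        if 0 ≤ d.1 + r ∧ d.1 + r < n ∧ 0 ≤ d.2 + c ∧ d.2 + c < m ∧
            pvCell s.1 (d.1 + r) (d.2 + c) = 0 ∧ pvCell g (d.1 + r) (d.2 + c) ≠ 0
        then (pvVSet s.1 (d.1 + r) (d.2 + c), s.2 ++ [(d.1 + r, d.2 + c)])
        else s) (v, q) = (v', q ++ new) ∧
      pvShape n.toNat m.toNat v' ∧
      pvZeros v' + new.length = pvZeros v ∧
      (∀ p, pvVP v' p ↔ (pvVP v p ∨ p ∈ new)) ∧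
      (∀ p ∈ new, (∃ d ∈ D, p = (d.1 + r, d.2 + c)) ∧ pvTr g n m p ∧ ¬ pvVP v p) ∧
      (∀ d ∈ D, pvTr g n m (d.1 + r, d.2 + c) → pvVP v' (d.1 + r, d.2 + c)) := by
  induction D with
  | nil =>
    intro v q hsh
    exact ⟨v, [], by simp, hsh, by simp, by simp, by simp, by simp⟩
  | cons d D ih =>
    intro v q hsh
    rw [List.foldl_cons]
    dsimp only
    by_cases hg : 0 ≤ d.1 + r ∧ d.1 + r < n ∧ 0 ≤ d.2 + c ∧ d.2 + c < m ∧
        pvCell v (d.1 + r) (d.2 + c) = 0 ∧ pvCell g (d.1 + r) (d.2 + c) ≠ 0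
    · rw [if_pos hg]
      obtain ⟨hg1, hg2, hg3, hg4, hg5, hg6⟩ := hg
      have htr : pvTr g n m (d.1 + r, d.2 + c) := ⟨⟨hg1, hg2, hg3, hg4⟩, hg6⟩
      have hnv : ¬ pvVP v (d.1 + r, d.2 + c) := by
        rintro ⟨_, _, h⟩; exact h hg5
      have hin : (d.1 + r).toNat < n.toNat := by omega
      have hjm : (d.2 + c).toNat < m.toNat := by omega
      have hsh1 := pvVSet_shape hsh (d.1 + r) (d.2 + c)
      obtain ⟨v', new', heq, hsh', hz, hvp, hnew, hlast⟩ := ih (pvVSet v (d.1 + r) (d.2 + c)) (q ++ [(d.1 + r, d.2 + c)]) hsh1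
      have hvset := pvVP_vset hsh hg1 hin hg3 hjm
      refine ⟨v', (d.1 + r, d.2 + c) :: new', by rw [heq]; simp, hsh', ?_, ?_, ?_, ?_⟩
      · have := pvZeros_vset hsh hg1 hin hg3 hjm hg5
        simp only [List.length_cons]
        omega
      · intro p
        rw [hvp p, hvset p]
        simp only [List.mem_cons]
        tauto
      · intro p hp
        rcases List.mem_cons.mp hp with rfl | hp'
        · exact ⟨⟨d, List.mem_cons_self, rfl⟩, htr, hnv⟩
        · obtain ⟨⟨d', hd', hpd⟩, htr', hnv'⟩ := hnew p hp'
          refine ⟨⟨d', List.mem_cons_of_mem _ hd', hpd⟩, htr', ?_⟩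
          intro hvpv
          exact hnv' ((hvset p).mpr (Or.inl hvpv))
      · intro d' hd' htr'
        rcases List.mem_cons.mp hd' with rfl | hd''
        · exact (hvp _).mpr (Or.inl ((hvset _).mpr (Or.inr rfl)))
        · exact hlast d' hd'' htr'
    · rw [if_neg hg]
      obtain ⟨v', new', heq, hsh', hz, hvp, hnew, hlast⟩ := ih v q hsh
      refine ⟨v', new', heq, hsh', hz, hvp, ?_, ?_⟩
      · intro p hp
        obtain ⟨⟨d', hd', hpd⟩, htr', hnv'⟩ := hnew p hp
        exact ⟨⟨d', List.mem_cons_of_mem _ hd', hpd⟩, htr', hnv'⟩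
      · intro d' hd' htr'
        rcases List.mem_cons.mp hd' with rfl | hd''
        · -- guard failed but the cell is truthy: it must be already visited
          have hvpv : pvVP v (d'.1 + r, d'.2 + c) := by
            obtain ⟨⟨h1, h2, h3, h4⟩, h5⟩ := htr'
            refine ⟨h1, h3, ?_⟩
            intro hc0
            exact hg ⟨h1, h2, h3, h4, hc0, h5⟩
          exact (hvp _).mpr (Or.inl hvpv)
        · exact hlast d' hd'' htr'

lemma pvDone (g : List (List Int)) (n m : Int) (V : Int × Int → Prop) (s : Int × Int)
    (v : List (List Int))
    (hVsub : ∀ p, V p → pvVP v p)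
    (hsound : ∀ p, pvVP v p → V p ∨ pvAdd g n m V s p)
    (hclosed : ∀ p, pvVP v p → ¬ V p → ∀ y, pvAdj p y → pvTr g n m y → pvVP v y)
    (hs : pvVP v s ∧ ¬ V s) :
    ∀ p, pvVP v p ↔ (V p ∨ pvAdd g n m V s p) := by
  have hadd : ∀ p, pvAdd g n m V s p → pvVP v p ∧ ¬ V p := by
    intro p h
    induction h with
    | refl => exact hs
    | tail h1 hstep ih =>
      exact ⟨hclosed _ ih.1 ih.2 _ hstep.1 hstep.2.1, hstep.2.2⟩
  intro p
  constructor
  · exact hsound p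
  · rintro (h | h)
    · exact hVsub p h
    · exact (hadd p h).1

lemma pvABfs_spec (g : List (List Int)) {n m : Int} (hn : 0 ≤ n) (hm : 0 ≤ m)
    (V : Int × Int → Prop) (s : Int × Int) :
    ∀ (fuel : Nat) (v : List (List Int)) (q : List (Int × Int)),
    pvShape n.toNat m.toNat v →
    2 * pvZeros v + q.length ≤ fuel →
    (∀ p, V p → pvVP v p) →
    (∀ p ∈ q, pvVP v p ∧ ¬ V p ∧ pvAdd g n m V s p) →
    (∀ p, pvVP v p → V p ∨ pvAdd g n m V s p) →
    (∀ p, pvVP v p → ¬ V p → p ∉ q → ∀ y, pvAdj p y → pvTr g n m y → pvVP v y) →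
    (pvVP v s ∧ ¬ V s) →
    pvShape n.toNat m.toNat (pvABfs g n m fuel v q) ∧
    (∀ p, pvVP (pvABfs g n m fuel v q) p ↔ (V p ∨ pvAdd g n m V s p)) := by
  intro fuel
  induction fuel with
  | zero =>
    intro v q hsh hfuel hVsub hq hsound hclosed hs
    have hq0 : q = [] := by
      cases q with
      | nil => rfl
      | cons a t => simp at hfuel
    subst hq0
    exact ⟨hsh, pvDone g n m V s v hVsub hsound
      (fun p h1 h2 => hclosed p h1 h2 (List.not_mem_nil)) hs⟩
  | succ fuel ih =>
    intro v q hsh hfuel hVsub hq hsound hclosed hs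
    cases q with
    | nil =>
      exact ⟨hsh, pvDone g n m V s v hVsub hsound
        (fun p h1 h2 => hclosed p h1 h2 (List.not_mem_nil)) hs⟩
    | cons rc rest =>
      obtain ⟨r, c⟩ := rc
      obtain ⟨hvrc, hnVrc, haddrc⟩ := hq (r, c) List.mem_cons_self
      obtain ⟨v', new, heq, hsh', hz, hvp, hnew, hlast⟩ :=
        pvAStepGen g hn hm r c pvDirs v rest hsh
      have hstep_eq : pvAStep g n m r c (v, rest) = (v', rest ++ new) := heq
      have hunfold : pvABfs g n m (fuel + 1) v ((r, c) :: rest)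
          = pvABfs g n m fuel v' (rest ++ new) := by
        show pvABfs g n m fuel (pvAStep g n m r c (v, rest)).1 (pvAStep g n m r c (v, rest)).2 = _
        rw [hstep_eq]
      rw [hunfold]
      -- new cells: properties
      have hnewAdd : ∀ p ∈ new, pvVP v' p ∧ ¬ V p ∧ pvAdd g n m V s p := by
        intro p hp
        obtain ⟨⟨d, hd, hpd⟩, htr, hnv⟩ := hnew p hp
        have hnVp : ¬ V p := fun h => hnv (hVsub p h)
        refine ⟨(hvp p).mpr (Or.inr hp), hnVp, ?_⟩
        exact Relation.ReflTransGen.tail haddrc ⟨⟨d, hd, by simpa using hpd⟩, htr, hnVp⟩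
      apply ih v' (rest ++ new)
      · exact hsh'
      · simp only [List.length_append]
        simp only [List.length_cons] at hfuel
        omega
      · intro p h
        exact (hvp p).mpr (Or.inl (hVsub p h))
      · intro p hp
        rcases List.mem_append.mp hp with hp' | hp'
        · obtain ⟨h1, h2, h3⟩ := hq p (List.mem_cons_of_mem _ hp')
          exact ⟨(hvp p).mpr (Or.inl h1), h2, h3⟩
        · exact hnewAdd p hp'
      · intro p hp
        rcases (hvp p).mp hp with hp' | hp'
        · exact hsound p hp'
        · exact Or.inr (hnewAdd p hp').2.2
      · intro p hp hnVp hpq y hadj htry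
        rcases (hvp p).mp hp with hp' | hp'
        · by_cases hprc : p = (r, c)
          · subst hprc
            obtain ⟨d, hd, rfl⟩ := hadj
            exact hlast d hd htry
          · have : p ∉ (r, c) :: rest := by
              intro h
              rcases List.mem_cons.mp h with h | h
              · exact hprc h
              · exact hpq (List.mem_append.mpr (Or.inl h))
            exact (hvp y).mpr (Or.inl (hclosed p hp' hnVp this y hadj htry))
        · exact absurd (List.mem_append.mpr (Or.inr hp')) hpq
      · exact ⟨(hvp s).mpr (Or.inl hs.1), hs.2⟩

lemma pvSatNil (k : Nat) (T : PySem.Set (Int × Int)) : pvBSat k [] T = T := by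
  cases k <;> simp [pvBSat]

lemma pvAddOut (g : List (List Int)) (n m : Int) (V : Int × Int → Prop) (s : Int × Int)
    (T : List (Int × Int)) (hsT : s ∉ T)
    (hcl : ∀ p, pvAdd g n m V s p → p ∉ T → ∀ y, pvStep g n m V p y → y ∉ T) :
    ∀ p, pvAdd g n m V s p → p ∉ T := by
  intro p h
  induction h with
  | refl => exact hsT
  | tail h1 hstep ih => exact hcl _ h1 ih _ hstep

lemma pvDiff_len_lt (T fr : List (Int × Int)) (x : Int × Int) (hxT : x ∈ T) (hxfr : x ∈ fr) :
    (PySem.Set.diff T fr).length < T.length := by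
  apply List.length_filter_lt_length_iff_exists.mpr
  exact ⟨x, hxT, by simp [hxfr]⟩

lemma pvBSat_spec (g : List (List Int)) (n m : Int) (V : Int × Int → Prop) (s : Int × Int) :
    ∀ (fuel : Nat) (Fr T : List (Int × Int)),
    T.length + 1 ≤ fuel →
    T.Nodup →
    (∀ p ∈ Fr, p ∉ T) →
    (∀ p ∈ Fr, pvAdd g n m V s p) →
    (∀ p ∈ T, pvTr g n m p ∧ ¬ V p) →
    (∀ p, pvTr g n m p → ¬ V p → ¬ pvAdd g n m V s p → p ∈ T) →
    (∀ p, pvAdd g n m V s p → p ∉ T → p ∉ Fr → ∀ y, pvStep g n m V p y → y ∉ T) →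
    s ∉ T →
    (∀ p, p ∈ pvBSat fuel Fr T ↔ (p ∈ T ∧ ¬ pvAdd g n m V s p)) ∧
    (pvBSat fuel Fr T).Nodup ∧ (pvBSat fuel Fr T).length ≤ T.length := by
  intro fuel
  induction fuel with
  | zero =>
    intro Fr T hfuel
    exact absurd hfuel (by omega)
  | succ fuel ih =>
    intro Fr T hfuel hTnd hdisj hFr hT hcompl hclosed hsT
    by_cases hFrE : Fr.isEmpty
    · rw [show pvBSat (fuel+1) Fr T = T by simp [pvBSat, hFrE]]
      have hout : ∀ p, pvAdd g n m V s p → p ∉ T :=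
        pvAddOut g n m V s T hsT
          (fun p hA hpT y hst => hclosed p hA hpT (by simp [List.isEmpty_iff.mp hFrE]) y hst)
      exact ⟨fun p => ⟨fun h => ⟨h, fun hA => hout p hA h⟩, fun h => h.1⟩, hTnd, le_refl _⟩
    · have hunfold : pvBSat (fuel+1) Fr T =
          pvBSat fuel (PySem.Set.inter (PySem.Set.ofList (Fr.flatMap pvNbrs)) T)
            (PySem.Set.diff T (PySem.Set.inter (PySem.Set.ofList (Fr.flatMap pvNbrs)) T)) := by
        simp [pvBSat, hFrE]
      set fr := PySem.Set.inter (PySem.Set.ofList (Fr.flatMap pvNbrs)) T with hfrdef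
      have hfr_mem : ∀ p, p ∈ fr ↔ ((∃ x ∈ Fr, pvAdj x p) ∧ p ∈ T) := by
        intro p
        rw [hfrdef, PySem.Set.mem_inter, PySem.Set.mem_ofList, List.mem_flatMap]
        constructor
        · rintro ⟨⟨x, hx, hnb⟩, hpT⟩
          exact ⟨⟨x, hx, (pvMem_nbrs x p).mp hnb⟩, hpT⟩
        · rintro ⟨⟨x, hx, hadj⟩, hpT⟩
          exact ⟨⟨x, hx, (pvMem_nbrs x p).mpr hadj⟩, hpT⟩
      have hfrAdd : ∀ p ∈ fr, pvAdd g n m V s p := by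
        intro p hp
        obtain ⟨⟨x, hx, hadj⟩, hpT⟩ := (hfr_mem p).mp hp
        obtain ⟨htrp, hnVp⟩ := hT p hpT
        exact Relation.ReflTransGen.tail (hFr x hx) ⟨hadj, htrp, hnVp⟩
      by_cases hfrNil : fr = []
      · have hTd : PySem.Set.diff T fr = T := by rw [hfrNil]; simp [PySem.Set.diff]
        rw [hunfold, hTd, hfrNil, pvSatNil]
        have hcl' : ∀ p, pvAdd g n m V s p → p ∉ T → ∀ y, pvStep g n m V p y → y ∉ T := by
          intro p hA hpT y hst hyT
          by_cases hpFr : p ∈ Fr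
          · have : y ∈ fr := (hfr_mem y).mpr ⟨⟨p, hpFr, hst.1⟩, hyT⟩
            rw [hfrNil] at this
            exact List.not_mem_nil this
          · exact hclosed p hA hpT hpFr y hst hyT
        have hout := pvAddOut g n m V s T hsT hcl'
        exact ⟨fun p => ⟨fun h => ⟨h, fun hA => hout p hA h⟩, fun h => h.1⟩, hTnd, le_refl _⟩
      · obtain ⟨x0, hx0⟩ := List.exists_mem_of_ne_nil fr hfrNil
        have hx0T : x0 ∈ T := ((hfr_mem x0).mp hx0).2
        have hlt : (PySem.Set.diff T fr).length < T.length := pvDiff_len_lt T fr x0 hx0T hx0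
        have hmemdiff : ∀ p, p ∈ PySem.Set.diff T fr ↔ (p ∈ T ∧ p ∉ fr) :=
          fun p => PySem.Set.mem_diff T fr p
        obtain ⟨hiff, hnd, hlen⟩ := ih fr (PySem.Set.diff T fr)
          (by omega)
          (PySem.Set.nodup_diff T fr hTnd)
          (fun p hp hpd => ((hmemdiff p).mp hpd).2 hp)
          hfrAdd
          (fun p hp => hT p ((hmemdiff p).mp hp).1)
          (fun p htrp hnVp hnA => (hmemdiff p).mpr
            ⟨hcompl p htrp hnVp hnA, fun hpfr => hnA (hfrAdd p hpfr)⟩)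
          (by
            intro p hA hpd hpfr y hst hyd
            obtain ⟨hyT, hyfr⟩ := (hmemdiff y).mp hyd
            by_cases hpT : p ∈ T
            · have hpfr' : p ∈ fr := by
                by_contra hnfr
                exact hpd ((hmemdiff p).mpr ⟨hpT, hnfr⟩)
              exact absurd hpfr' hpfr
            · by_cases hpFr : p ∈ Fr
              · exact hyfr ((hfr_mem y).mpr ⟨⟨p, hpFr, hst.1⟩, hyT⟩)
              · exact hclosed p hA hpT hpFr y hst hyT)
          (fun hsd => hsT ((hmemdiff s).mp hsd).1)
        rw [hunfold]
        refine ⟨?_, hnd, by omega⟩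
        intro p
        rw [hiff p, hmemdiff p]
        constructor
        · rintro ⟨⟨hpT, _⟩, hnA⟩
          exact ⟨hpT, hnA⟩
        · rintro ⟨hpT, hnA⟩
          exact ⟨⟨hpT, fun hpfr => hnA (hfrAdd p hpfr)⟩, hnA⟩

def pvLexLt (p q : Int × Int) : Prop := p.1 < q.1 ∨ (p.1 = q.1 ∧ p.2 < q.2)

lemma pvMin2_aux (p : Int × Int) :
    ∀ (xs : List (Int × Int)) (acc : Option (Int × Int)),
    (∀ a, acc = some a → a = p ∨ pvLexLt p a) →
    (acc = some p ∨ p ∈ xs) →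
    (∀ x ∈ xs, x = p ∨ pvLexLt p x) →
    xs.foldl (fun acc x =>
      match acc with
      | none => some x
      | some m =>
        if (decide (x.1 < m.1) || !decide (m.1 < x.1) && decide (x.2 < m.2)) = true
        then some x else some m) acc = some p := by
  intro xs
  induction xs with
  | nil =>
    intro acc h1 h2 _
    rcases h2 with h | h
    · simpa using h
    · exact absurd h List.not_mem_nil
  | cons x xs ih =>
    intro acc h1 h2 hall
    rw [List.foldl_cons]
    have hx := hall x List.mem_cons_self
    have htail : ∀ y ∈ xs, y = p ∨ pvLexLt p y :=
      fun y hy => hall y (List.mem_cons_of_mem _ hy)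
    cases acc with
    | none =>
      apply ih
      · intro a ha
        simp only [Option.some.injEq] at ha
        exact ha ▸ hx
      · rcases hx with rfl | hlt
        · exact Or.inl rfl
        · rcases h2 with h | h
          · exact absurd h (by simp)
          · rcases List.mem_cons.mp h with rfl | h'
            · exact absurd hlt (by unfold pvLexLt; omega)
            · exact Or.inr h'
      · exact htail
    | some a =>
      show List.foldl _ (if (decide (x.1 < a.1) || !decide (a.1 < x.1) && decide (x.2 < a.2)) = true
        then some x else some a) xs = some p
      rcases h1 a rfl with heq | hpa
      · -- the accumulator already is p
        rw [heq]
        rcases hx with rfl | hlt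
        · have hif : (if (decide (x.1 < x.1) || !decide (x.1 < x.1) && decide (x.2 < x.2)) = true
              then some x else some x) = some x := by split <;> rfl
          rw [hif]
          exact ih (some x) (fun b hb => by simp only [Option.some.injEq] at hb; exact hb ▸ Or.inl rfl)
            (Or.inl rfl) htail
        · rw [if_neg (by
            unfold pvLexLt at hlt
            simp only [Bool.or_eq_true, Bool.and_eq_true, Bool.not_eq_true',
              decide_eq_true_eq, decide_eq_false_iff_not]
            omega)]
          exact ih (some p) (fun b hb => by simp only [Option.some.injEq] at hb; exact hb ▸ Or.inl rfl)
            (Or.inl rfl) htail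
      · -- p is strictly below the accumulator
        unfold pvLexLt at hpa
        have hnext : ∀ b, (if (decide (x.1 < a.1) || !decide (a.1 < x.1) && decide (x.2 < a.2)) = true
            then some x else some a) = some b → b = p ∨ pvLexLt p b := by
          intro b hb
          split at hb <;> simp only [Option.some.injEq] at hb
          · exact hb ▸ hx
          · exact hb ▸ Or.inr hpa
        have hmem : (if (decide (x.1 < a.1) || !decide (a.1 < x.1) && decide (x.2 < a.2)) = true
            then some x else some a) = some p ∨ p ∈ xs := by
          rcases h2 with h | h
          · simp only [Option.some.injEq] at h
            exact absurd (h ▸ hpa) (by omega)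
          · rcases List.mem_cons.mp h with rfl | h'
            · left
              rw [if_pos (by
                simp only [Bool.or_eq_true, Bool.and_eq_true, Bool.not_eq_true',
                  decide_eq_true_eq, decide_eq_false_iff_not]
                omega)]
            · exact Or.inr h'
        exact ih _ hnext hmem htail

lemma pvMin2_eq (xs : List (Int × Int)) (p : Int × Int) (hp : p ∈ xs)
    (hmin : ∀ x ∈ xs, x = p ∨ pvLexLt p x) :
    PySem.List.min2? xs Prod.fst Prod.snd = some p := by
  unfold PySem.List.min2?
  have h := pvMin2_aux p xs none (fun a ha => absurd ha (by simp)) (Or.inr hp) hmin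
  convert h using 2
  funext acc x
  cases acc with
  | none => rfl
  | some m => dsimp only

lemma pvBLoop_nil (fuel : Nat) (c : Int) : pvBLoop fuel [] c = c := by
  cases fuel <;> simp [pvBLoop]

lemma pvOuter (g : List (List Int)) {n m : Int} (hn : 0 ≤ n) (hm : 0 ≤ m) :
    ∀ (L : List (Int × Int)) (v : List (List Int)) (T : List (Int × Int)) (c : Int) (fuelB : Nat),
    (∀ p ∈ L, pvInb n m p) →
    L.Pairwise pvLexLt →
    pvShape n.toNat m.toNat v →
    (∀ p, pvVP v p → pvTr g n m p) →
    T.Nodup →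
    (∀ p, p ∈ T ↔ (pvTr g n m p ∧ ¬ pvVP v p)) →
    (∀ p ∈ T, p ∈ L) →
    T.length + 1 ≤ fuelB →
    (L.foldl (fun (s : List (List Int) × Int) p =>
        if pvCell s.1 p.1 p.2 = 0 ∧ pvCell g p.1 p.2 ≠ 0 then
          (pvABfs g n m (2 * n.toNat * m.toNat + 1) (pvVSet s.1 p.1 p.2) [p], s.2 + 1)
        else s) (v, c)).2 = pvBLoop fuelB T c := by
  intro L
  induction L with
  | nil =>
    intro v T c fuelB hLb hLs hsh hvtr hTnd hTch hTL hfuel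
    have hT0 : T = [] := List.eq_nil_iff_forall_not_mem.mpr (fun p hp => List.not_mem_nil (hTL p hp))
    subst hT0
    rw [List.foldl_nil, pvBLoop_nil]
  | cons p L ihL =>
    intro v T c fuelB hLb hLs hsh hvtr hTnd hTch hTL hfuel
    rw [List.foldl_cons]
    have hinb := hLb p List.mem_cons_self
    obtain ⟨h1, h2, h3, h4⟩ := hinb
    by_cases hg : pvCell v p.1 p.2 = 0 ∧ pvCell g p.1 p.2 ≠ 0
    · -- p starts a new component
      have htrp : pvTr g n m p := ⟨⟨h1, h2, h3, h4⟩, hg.2⟩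
      have hnvp : ¬ pvVP v p := fun h => h.2.2 hg.1
      have hpT : p ∈ T := (hTch p).mpr ⟨htrp, hnvp⟩
      rw [if_pos hg]
      dsimp only
      have hin : p.1.toNat < n.toNat := by omega
      have hjm : p.2.toNat < m.toNat := by omega
      have hsh1 := pvVSet_shape hsh p.1 p.2
      have hvset : ∀ q, pvVP (pvVSet v p.1 p.2) q ↔ (pvVP v q ∨ q = p) := by
        intro q
        rw [pvVP_vset hsh h1 hin h3 hjm q]
      have hzset := pvZeros_vset hsh h1 hin h3 hjm hg.1
      obtain ⟨hshF, hF⟩ := pvABfs_spec g hn hm (pvVP v) p (2 * n.toNat * m.toNat + 1)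
        (pvVSet v p.1 p.2) [p] hsh1
        (by
          have hzl := pvZeros_le hsh
          have h2nm : 2 * n.toNat * m.toNat = 2 * (n.toNat * m.toNat) := Nat.mul_assoc 2 _ _
          simp only [List.length_cons, List.length_nil]
          omega)
        (fun q hq => (hvset q).mpr (Or.inl hq))
        (by
          intro q hq
          rcases List.mem_singleton.mp hq with rfl
          exact ⟨(hvset q).mpr (Or.inr rfl), hnvp, Relation.ReflTransGen.refl⟩)
        (by
          intro q hq
          rcases (hvset q).mp hq with h | rfl
          · exact Or.inl h
          · exact Or.inr Relation.ReflTransGen.refl)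
        (by
          intro q hq hnq hqnot y hadj htry
          rcases (hvset q).mp hq with h | rfl
          · exact absurd h hnq
          · exact (hqnot (List.mem_singleton_self _)).elim)
        ⟨(hvset p).mpr (Or.inr rfl), hnvp⟩
      -- the B side takes one outer step, removing exactly p's component
      have hTne : ¬ (T.isEmpty = true) := by
        rw [List.isEmpty_iff]
        exact fun h => List.not_mem_nil (h ▸ hpT)
      cases fuelB with
      | zero => exact absurd hfuel (by omega)
      | succ fb =>
        have hmins : ∀ x ∈ T, x = p ∨ pvLexLt p x := by
          intro x hx
          rcases List.mem_cons.mp (hTL x hx) with rfl | hx'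
          · exact Or.inl rfl
          · exact Or.inr ((List.pairwise_cons.mp hLs).1 x hx')
        have hmin : (PySem.List.min2? T Prod.fst Prod.snd).getD (0, 0) = p := by
          rw [pvMin2_eq T p hpT hmins]
          rfl
        have hRHS : pvBLoop (fb + 1) T c =
            pvBLoop fb (pvBSat ((PySem.Set.diff T [p]).length + 1)
              (PySem.Set.ofList [p]) (PySem.Set.diff T [p])) (c + 1) := by
          show (if T.isEmpty then c else _) = _
          rw [if_neg hTne, hmin]
        rw [hRHS]
        have hmemtodo1 : ∀ q, q ∈ PySem.Set.diff T [p] ↔ (q ∈ T ∧ q ≠ p) := by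
          intro q
          rw [PySem.Set.mem_diff]
          simp
        have hAddtr : ∀ q, pvAdd g n m (pvVP v) p q → pvTr g n m q :=
          fun q hq => pvAdd_tr htrp hq
        obtain ⟨hsatIff, hsatNd, hsatLen⟩ := pvBSat_spec g n m (pvVP v) p
          ((PySem.Set.diff T [p]).length + 1) (PySem.Set.ofList [p]) (PySem.Set.diff T [p])
          (le_refl _)
          (PySem.Set.nodup_diff T [p] hTnd)
          (by
            intro q hq
            have hqp : q = p := by
              have := (PySem.Set.mem_ofList [p] q).mp hq
              simpa using this
            exact fun hd => ((hmemtodo1 q).mp hd).2 hqp)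
          (by
            intro q hq
            have hqp : q = p := by
              have := (PySem.Set.mem_ofList [p] q).mp hq
              simpa using this
            rw [hqp]
            exact Relation.ReflTransGen.refl)
          (fun q hq => (hTch q).mp ((hmemtodo1 q).mp hq).1)
          (by
            intro q htrq hnV hnA
            refine (hmemtodo1 q).mpr ⟨(hTch q).mpr ⟨htrq, hnV⟩, ?_⟩
            intro hqp
            exact hnA (by rw [hqp]; exact Relation.ReflTransGen.refl))
          (by
            intro q hA hqd hqFr y hst hyd
            have hqp : q ≠ p := fun h =>
              hqFr ((PySem.Set.mem_ofList [p] q).mpr (by rw [h]; exact List.mem_singleton_self _))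
            have hqT : q ∈ T := (hTch q).mpr ⟨hAddtr q hA, pvAdd_notV hA hqp⟩
            exact hqd ((hmemtodo1 q).mpr ⟨hqT, hqp⟩))
          (fun hd => ((hmemtodo1 p).mp hd).2 rfl)
        apply ihL
        · exact fun q hq => hLb q (List.mem_cons_of_mem _ hq)
        · exact (List.pairwise_cons.mp hLs).2
        · exact hshF
        · intro q hq
          rcases (hF q).mp hq with h | h
          · exact hvtr q h
          · exact hAddtr q h
        · exact hsatNd
        · intro q
          rw [hsatIff q, hmemtodo1 q]
          constructor
          · rintro ⟨⟨hqT, hqp⟩, hnA⟩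
            obtain ⟨htrq, hnVq⟩ := (hTch q).mp hqT
            exact ⟨htrq, fun hvF => ((hF q).mp hvF).elim hnVq hnA⟩
          · rintro ⟨htrq, hnVF⟩
            have hnVq : ¬ pvVP v q := fun h => hnVF ((hF q).mpr (Or.inl h))
            have hnA : ¬ pvAdd g n m (pvVP v) p q := fun h => hnVF ((hF q).mpr (Or.inr h))
            refine ⟨⟨(hTch q).mpr ⟨htrq, hnVq⟩, ?_⟩, hnA⟩
            intro hqp
            exact hnA (by rw [hqp]; exact Relation.ReflTransGen.refl)
        · intro q hq
          obtain ⟨⟨hqT, hqp⟩, _⟩ := (hsatIff q).mp hq |>.imp (fun h => (hmemtodo1 q).mp h) id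
          rcases List.mem_cons.mp (hTL q hqT) with rfl | h'
          · exact absurd rfl hqp
          · exact h'
        · have hlt : (PySem.Set.diff T [p]).length < T.length :=
            pvDiff_len_lt T [p] p hpT (by simp)
          omega
    · -- p is skipped by both
      rw [if_neg hg]
      apply ihL v T c fuelB
      · exact fun q hq => hLb q (List.mem_cons_of_mem _ hq)
      · exact (List.pairwise_cons.mp hLs).2
      · exact hsh
      · exact hvtr
      · exact hTnd
      · exact hTch
      · intro q hq
        rcases List.mem_cons.mp (hTL q hq) with rfl | h'
        · obtain ⟨htrq, hnVq⟩ := (hTch q).mp hq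
          have hc0 : pvCell v q.1 q.2 = 0 := by
            by_contra hc
            exact hnVq ⟨h1, h3, hc⟩
          exact absurd ⟨hc0, htrq.2⟩ hg
        · exact h'
      · exact hfuel



-- ---- the row-major scan list and the initial todo set ----
def pvL (n m : Int) : List (Int × Int) :=
  (PySem.List.pyRange 0 n).flatMap (fun i => (PySem.List.pyRange 0 m).map (fun j => (i, j)))

lemma pvRange_pairwise (b : Int) (hb : 0 ≤ b) :
    (PySem.List.pyRange 0 b).Pairwise (· < ·) := by
  rw [show b = ((b.toNat : Nat) : Int) by omega, PySem.List.pyRange_zero_natCast]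
  exact List.pairwise_lt_range.map _ (fun a b h => by exact_mod_cast h)

lemma pvL_mem (n m : Int) (p : Int × Int) : p ∈ pvL n m ↔ pvInb n m p := by
  unfold pvL pvInb
  simp only [List.mem_flatMap, List.mem_map, PySem.List.mem_pyRange_one]
  constructor
  · rintro ⟨i, ⟨hi0, hin⟩, j, ⟨hj0, hjm⟩, rfl⟩
    exact ⟨hi0, hin, hj0, hjm⟩
  · rintro ⟨hi0, hin, hj0, hjm⟩
    exact ⟨p.1, ⟨hi0, hin⟩, p.2, ⟨hj0, hjm⟩, rfl⟩

lemma pvL_pairwise (n m : Int) (hn : 0 ≤ n) (hm : 0 ≤ m) :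
    (pvL n m).Pairwise pvLexLt := by
  unfold pvL
  rw [List.pairwise_flatMap]
  constructor
  · intro i _
    exact (pvRange_pairwise m hm).map _ (fun a b h => Or.inr ⟨rfl, h⟩)
  · apply (pvRange_pairwise n hn).imp
    intro i1 i2 h x hx y hy
    simp only [List.mem_map] at hx hy
    obtain ⟨a, _, rfl⟩ := hx
    obtain ⟨b, _, rfl⟩ := hy
    exact Or.inl h

lemma pvTodo_mem (g : List (List Int)) (n m : Int) (p : Int × Int) :
    p ∈ (PySem.List.pyRange 0 n).flatMap (fun i =>
      ((PySem.List.pyRange 0 m).filter (fun j => pvCell g i j != 0)).map (fun j => (i, j))) ↔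
    pvTr g n m p := by
  unfold pvTr pvInb
  simp only [List.mem_flatMap, List.mem_map, List.mem_filter,
    PySem.List.mem_pyRange_one, bne_iff_ne, ne_eq]
  constructor
  · rintro ⟨i, ⟨hi0, hin⟩, j, ⟨⟨hj0, hjm⟩, hc⟩, rfl⟩
    exact ⟨⟨hi0, hin, hj0, hjm⟩, hc⟩
  · rintro ⟨⟨hi0, hin, hj0, hjm⟩, hc⟩
    exact ⟨p.1, ⟨hi0, hin⟩, p.2, ⟨⟨hj0, hjm⟩, hc⟩, rfl⟩

-- ===== VERDICT (by name: the statement is the Claim_ definition above) =====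
theorem orangeRotting_spec : Claim_equal_orangeRotting := by
  intro grid _ hpre
  unfold Spec_orangeRotting
  obtain ⟨hne, _⟩ := hpre
  cases grid with
  | nil => exact absurd rfl hne
  | cons r0 grest =>
  have h0 : PySem.List.pyGet? (r0 :: grest) 0 = some r0 := by
    rw [show (0 : Int) = ((0 : Nat) : Int) from rfl, PySem.List.pyGet?_natCast]
    rfl
  unfold orangeRotting orangeRotting_alt
  rw [h0]
  dsimp only
  set g := r0 :: grest with hg
  set n : Int := ((g.length : Nat) : Int) with hn'
  set m : Int := ((r0.length : Nat) : Int) with hm'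
  have hn : (0 : Int) ≤ n := by simp [hn']
  have hm : (0 : Int) ≤ m := by simp [hm']
  set lst := (PySem.List.pyRange 0 n).flatMap (fun i =>
    ((PySem.List.pyRange 0 m).filter (fun j => pvCell g i j != 0)).map (fun j => (i, j))) with hlst
  set v0 : List (List Int) := List.replicate n.toNat (List.replicate m.toNat 0) with hv0
  have hfold : (PySem.List.pyRange 0 n).foldl (fun s i =>
      (PySem.List.pyRange 0 m).foldl (fun (s : List (List Int) × Int) j =>
        if pvCell s.1 i j = 0 ∧ pvCell g i j ≠ 0 then
          (pvABfs g n m (2 * n.toNat * m.toNat + 1) (pvVSet s.1 i j) [(i, j)], s.2 + 1)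
        else s) s) (v0, 0) =
      (pvL n m).foldl (fun (s : List (List Int) × Int) p =>
        if pvCell s.1 p.1 p.2 = 0 ∧ pvCell g p.1 p.2 ≠ 0 then
          (pvABfs g n m (2 * n.toNat * m.toNat + 1) (pvVSet s.1 p.1 p.2) [p], s.2 + 1)
        else s) (v0, 0) := by
    rw [pvL, List.foldl_flatMap]
    simp only [List.foldl_map]
  rw [hfold]
  have hkey := pvOuter g hn hm (pvL n m) v0 (PySem.Set.ofList lst) 0
    ((PySem.Set.ofList lst).length + 1)
    (fun p hp => (pvL_mem n m p).mp hp)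
    (pvL_pairwise n m hn hm)
    (by rw [hv0]; exact pvShape_init n.toNat m.toNat)
    (fun p h => absurd h (pvVP_init n.toNat m.toNat p))
    (PySem.Set.nodup_ofList lst)
    (by
      intro p
      rw [PySem.Set.mem_ofList, hlst, pvTodo_mem g n m p]
      exact ⟨fun h => ⟨h, pvVP_init n.toNat m.toNat p⟩, fun h => h.1⟩)
    (by
      intro p hp
      rw [PySem.Set.mem_ofList, hlst, pvTodo_mem g n m p] at hp
      exact (pvL_mem n m p).mpr hp.1)
    (le_refl _)
  rw [hkey]
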